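-- pv_equiv track=rewrite | github.com/sinatraXX/Public-private_key | encryption.py | getBlocksFromText
-- ===== SOURCE A (Python) =====
-- SYMBOLS = 'ABCDEFGHIJKLMNOPQRSTUVWXYZabcdefghijklmnopqrstuvwxyz1234567890 !?.,'
--
-- def getBlocksFromText(message, blockSize):
--     blockInts = []
--     for blockStart in range(0, len(message), blockSize):
--         blockInt = 0
--         for i in range(blockStart, min(blockStart + blockSize, len(message))):
--             blockInt += (SYMBOLS.index(message[i])) * (len(SYMBOLS) ** (i % blockSize))
--         blockInts.append(blockInt)
--     return blockInts
-- ===== SOURCE B (Python) =====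
-- SYMBOLS = 'ABCDEFGHIJKLMNOPQRSTUVWXYZabcdefghijklmnopqrstuvwxyz1234567890 !?.,'
--
-- def getBlocksFromText(message, blockSize):
--     blockInts = []
--     if blockSize <= 0:
--         return blockInts
--     pos = 0
--     while pos < len(message):
--         value = 0
--         for ch in reversed(message[pos:pos + blockSize]):
--             value = value * len(SYMBOLS) + SYMBOLS.index(ch)
--         blockInts.append(value)
--         pos += blockSize
--     return blockInts
-- ===== Notes on version B (the rewrite author's own statement) =====
-- stated objective: faster
-- what changed: B walks the message with a while-loop position pointer, slices each block out and folds it with Horner's rule over the reversed chunk (value = value*66 + digit), instead of A's index-range loop that sums explicit power terms 66**(i % blockSize).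
import Mathlib
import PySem

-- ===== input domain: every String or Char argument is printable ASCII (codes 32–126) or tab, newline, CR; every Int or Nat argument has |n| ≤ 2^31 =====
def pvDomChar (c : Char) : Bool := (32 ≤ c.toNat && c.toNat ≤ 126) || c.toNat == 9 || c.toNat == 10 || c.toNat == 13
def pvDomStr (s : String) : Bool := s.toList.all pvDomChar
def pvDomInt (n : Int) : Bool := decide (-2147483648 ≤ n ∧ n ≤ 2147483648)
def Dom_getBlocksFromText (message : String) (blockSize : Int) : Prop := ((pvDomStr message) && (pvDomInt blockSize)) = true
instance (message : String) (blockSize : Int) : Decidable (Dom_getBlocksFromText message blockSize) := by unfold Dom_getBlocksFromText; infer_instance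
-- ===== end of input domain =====

-- B replaces A's index-range loop with power terms 66**(i % blockSize) by a while-loop position
-- pointer that slices each block out and folds it by Horner's rule over the reversed chunk.

-- ===== PORT A =====
-- SYMBOLS (module-level constant shared by both Pythons)
def pySymbols : List Char := "ABCDEFGHIJKLMNOPQRSTUVWXYZabcdefghijklmnopqrstuvwxyz1234567890 !?.,".toList

-- SYMBOLS.index(message[i]) : on Pre_ inputs the executed indices are in range and the character is
-- in SYMBOLS, so pyGetD's default and index?'s .getD 0 are never taken (Python raises there; excluded by Pre_).
def pySymIndex (chars : List Char) (i : Int) : Int :=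
  ((PySem.List.index? pySymbols (PySem.List.pyGetD chars i ' ')).getD 0 : Nat)

def getBlocksFromText (message : String) (blockSize : Int) : List Int :=
  let chars := message.toList
  let n : Int := chars.length
  (PySem.List.pyRange 0 n blockSize).foldl
    (fun blockInts blockStart =>
      blockInts ++
        [(PySem.List.pyRange blockStart (min (blockStart + blockSize) n) 1).foldl
          (fun blockInt i =>
            -- i % blockSize ≥ 0 whenever this body runs (the inner range is nonempty only for
            -- blockSize > 0), so .toNat on the exponent is exact
            blockInt + pySymIndex chars i
              * (pySymbols.length : Int) ^ (PySem.Int.mod i blockSize).toNat)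
          0])
    []

-- ===== PORT B =====
-- SYMBOLS.index(ch) on a character already in hand (B never indexes the message by position)
def pySymIndexCh (ch : Char) : Int := ((PySem.List.index? pySymbols ch).getD 0 : Nat)

-- 'value = 0; for ch in reversed(chunk): value = value * len(SYMBOLS) + SYMBOLS.index(ch)'
def pyBlockValue (chunk : List Char) : Int :=
  chunk.reverse.foldl (fun value ch => value * (pySymbols.length : Int) + pySymIndexCh ch) 0

-- the 'while pos < len(message)' loop; pos is a Nat and the step blockSize enters as bn + 1
-- (bn = blockSize - 1, possible since the wrapper only reaches the loop for blockSize ≥ 1), and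
-- message[pos:pos + blockSize] = (chars.drop pos).take (bn + 1) — exact for 0 ≤ pos (Python slices clamp, as take does)
def altLoop (chars : List Char) (bn : Nat) (pos : Nat) (blockInts : List Int) : List Int :=
  if pos < chars.length then
    altLoop chars bn (pos + (bn + 1)) (blockInts ++ [pyBlockValue ((chars.drop pos).take (bn + 1))])
  else blockInts
termination_by chars.length - pos
decreasing_by omega

def getBlocksFromText_alt (message : String) (blockSize : Int) : List Int :=
  if blockSize ≤ 0 then [] else altLoop message.toList (blockSize.toNat - 1) 0 []

-- ===== PRECONDITION & SPEC =====
-- Pre_ excludes exactly the inputs where Python A raises: blockSize = 0 (range's ValueError), and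
-- a character outside SYMBOLS when blockSize > 0 (SYMBOLS.index's ValueError; for blockSize < 0 the
-- outer range is empty and A returns [] regardless of the characters).
def Pre_getBlocksFromText (message : String) (blockSize : Int) : Prop :=
  blockSize ≠ 0 ∧ (0 < blockSize → message.toList.all (fun c => pySymbols.contains c) = true)
instance (message : String) (blockSize : Int) : Decidable (Pre_getBlocksFromText message blockSize) := by
  unfold Pre_getBlocksFromText; infer_instance

def pvWitness_getBlocksFromText : String × Int := ("Hi", 2)

def Spec_getBlocksFromText (message : String) (blockSize : Int) (out : List Int) : Prop := out = getBlocksFromText_alt message blockSize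
instance (message : String) (blockSize : Int) (out : List Int) : Decidable (Spec_getBlocksFromText message blockSize out) := by unfold Spec_getBlocksFromText; infer_instance

-- ===== CLAIM (what is proved, stated in full; the proofs are below) =====
def Claim_equal_getBlocksFromText : Prop := ∀ (message : String) (blockSize : Int), Dom_getBlocksFromText message blockSize → Pre_getBlocksFromText message blockSize → Spec_getBlocksFromText message blockSize (getBlocksFromText message blockSize)

-- ===== LEMMAS AND PROOFS =====

-- range(0, b, s) with s < 0 and 0 ≤ b is empty
theorem pyRange_zero_neg_step (b s : Int) (hs : s < 0) (hb : 0 ≤ b) :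
    PySem.List.pyRange 0 b s = [] := by
  simp only [PySem.List.pyRange]
  split_ifs with h1 h2 h3 <;> simp_all <;> omega

-- range(a, y, s) with positive step and y ≤ a is empty
theorem pyRange_nonpos_nil (a y s : Int) (hs : 0 < s) (h : y ≤ a) :
    PySem.List.pyRange a y s = [] := by
  rw [PySem.List.pyRange_of_pos _ _ hs]
  simp [show ¬ a < y by omega]

-- range(a, y, s) with positive step and a < y starts with a
theorem pyRange_pos_cons (a y s : Int) (hs : 0 < s) (h : a < y) :
    PySem.List.pyRange a y s = a :: PySem.List.pyRange (a + s) y s := by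
  rw [PySem.List.pyRange_of_pos _ _ hs, PySem.List.pyRange_of_pos _ _ hs, if_pos h]
  have hq0 : 0 ≤ (y - (a + s) + s - 1) / s := Int.ediv_nonneg (by omega) (by omega)
  have htail : (if a + s < y then ((y - (a + s) + s - 1) / s).toNat else 0)
      = ((y - (a + s) + s - 1) / s).toNat := by
    by_cases hy : a + s < y
    · rw [if_pos hy]
    · rw [if_neg hy]
      have : (y - (a + s) + s - 1) / s < 1 := by
        rw [Int.ediv_lt_iff_lt_mul hs]; omega
      omega
  have hcnt : ((y - a + s - 1) / s).toNat = ((y - (a + s) + s - 1) / s).toNat + 1 := by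
    have h1 : y - a + s - 1 = (y - (a + s) + s - 1) + 1 * s := by ring
    rw [h1, Int.add_mul_ediv_right _ _ (by omega : s ≠ 0)]
    omega
  rw [htail, hcnt, List.range_succ_eq_map, List.map_cons, List.map_map]
  refine congrArg₂ List.cons (by simp) ?_
  apply List.map_congr_left
  intro k _
  simp only [Function.comp]
  push_cast
  ring

-- the characters of the slice [a, e) of chars, read through pyGetD, are (drop a).take (e - a)
theorem chunk_map (chars : List Char) (d : Char) (a e : Int)
    (h0 : 0 ≤ a) (hae : a ≤ e) (he : e ≤ (chars.length : Int)) :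
    (PySem.List.pyRange a e 1).map (fun j => PySem.List.pyGetD chars j d)
      = (chars.drop a.toNat).take (e - a).toNat := by
  have hm := PySem.List.map_pyGetD_pyRange' chars d h0
  rw [PySem.List.pyRange_one_append a e (chars.length : Int) hae he, List.map_append] at hm
  have hlen : ((PySem.List.pyRange a e 1).map (fun j => PySem.List.pyGetD chars j d)).length
      = (e - a).toNat := by
    rw [List.length_map, PySem.List.length_pyRange_one]
  calc (PySem.List.pyRange a e 1).map (fun j => PySem.List.pyGetD chars j d)
      = (((PySem.List.pyRange a e 1).map (fun j => PySem.List.pyGetD chars j d))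
          ++ ((PySem.List.pyRange e (chars.length : Int) 1).map (fun j => PySem.List.pyGetD chars j d))).take
          (e - a).toNat := by rw [List.take_left' hlen]
    _ = (chars.drop a.toNat).take (e - a).toNat := by rw [hm]

-- Horner's rule over an ascending index range equals the sum of explicit power terms
theorem horner_foldr (v : Int → Int) (L : Int) (k : Nat) :
    ∀ (a e : Int), (e - a).toNat = k →
      (PySem.List.pyRange a e 1).foldr (fun i acc => acc * L + v i) 0
        = ((PySem.List.pyRange a e 1).map (fun i => v i * L ^ (i - a).toNat)).sum := by
  induction k with
  | zero =>
    intro a e hk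
    rw [PySem.List.pyRange_one_eq_nil (by omega)]
    simp
  | succ j ih =>
    intro a e hk
    have hlt : a < e := by omega
    rw [PySem.List.pyRange_one_cons hlt]
    have ihr := ih (a + 1) e (by omega)
    simp only [List.foldr_cons, List.map_cons, List.sum_cons, ihr]
    have hmap : ((PySem.List.pyRange (a + 1) e 1).map (fun i => v i * L ^ (i - (a + 1)).toNat)).sum * L
        = ((PySem.List.pyRange (a + 1) e 1).map (fun i => v i * L ^ (i - a).toNat)).sum := by
      rw [← List.sum_map_mul_right]
      apply congrArg
      apply List.map_congr_left
      intro i hi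
      have hb := (PySem.List.mem_pyRange_one).1 hi
      have hpow : (i - (a + 1)).toNat + 1 = (i - a).toNat := by omega
      rw [mul_assoc, ← pow_succ, hpow]
    rw [hmap]
    simp only [sub_self, Int.toNat_zero, pow_zero, mul_one]
    ring

-- A's inner power-sum loop over block [bs, bs+b) equals B's Horner fold over the sliced chunk
theorem blockVal_eq (chars : List Char) (b bs : Int) (hb : 0 < b) (hbs : 0 ≤ bs)
    (hlt : bs < (chars.length : Int)) (hdvd : b ∣ bs) :
    (PySem.List.pyRange bs (min (bs + b) (chars.length : Int)) 1).foldl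
      (fun blockInt i => blockInt + pySymIndex chars i
        * (pySymbols.length : Int) ^ (PySem.Int.mod i b).toNat) 0
    = pyBlockValue ((chars.drop bs.toNat).take b.toNat) := by
  set n : Int := (chars.length : Int) with hn
  set e : Int := min (bs + b) n with he
  have h0e : bs ≤ e := by simp [he]; omega
  have hen : e ≤ n := min_le_right _ _
  -- A side: a sum of power terms with exponent i - bs
  rw [PySem.List.foldl_add, zero_add]
  have hmod : ∀ i ∈ PySem.List.pyRange bs e 1,
      pySymIndex chars i * (pySymbols.length : Int) ^ (PySem.Int.mod i b).toNat
        = pySymIndex chars i * (pySymbols.length : Int) ^ (i - bs).toNat := by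
    intro i hi
    have hib := (PySem.List.mem_pyRange_one).1 hi
    obtain ⟨q, hq⟩ := hdvd
    have : PySem.Int.mod i b = i - bs := by
      rw [PySem.Int.mod_eq_emod_of_pos hb]
      have h2 : i % b = (i - bs) % b := by
        conv_lhs => rw [show i = (i - bs) + b * q from by omega]
        rw [Int.add_mul_emod_self_left]
      rw [h2]
      exact Int.emod_eq_of_lt (by omega) (by omega)
    rw [this]
  rw [List.map_congr_left hmod]
  -- B side: Horner over the reversed chunk is the same sum
  have hchunk : (chars.drop bs.toNat).take b.toNat = (chars.drop bs.toNat).take (e - bs).toNat := by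
    rw [List.take_eq_take_iff, List.length_drop]
    omega
  rw [pyBlockValue, hchunk, ← chunk_map chars ' ' bs e hbs h0e hen, List.foldl_reverse,
      List.foldr_map,
      horner_foldr (fun i => pySymIndexCh (PySem.List.pyGetD chars i ' '))
        (pySymbols.length : Int) (e - bs).toNat bs e rfl]
  rfl

-- the while loop, started at pos with accumulator acc, appends one Horner value per block start
theorem altLoop_eq (fuel : Nat) :
    ∀ (chars : List Char) (bn pos : Nat) (acc : List Int), chars.length - pos ≤ fuel →
      altLoop chars bn pos acc
        = acc ++ (PySem.List.pyRange (pos : Int) (chars.length : Int) ((bn : Int) + 1)).map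
            (fun bs => pyBlockValue ((chars.drop bs.toNat).take (bn + 1))) := by
  induction fuel with
  | zero =>
    intro chars bn pos acc hf
    rw [altLoop, if_neg (by omega), pyRange_nonpos_nil _ _ _ (by omega) (by exact_mod_cast by omega)]
    simp
  | succ f ih =>
    intro chars bn pos acc hf
    rw [altLoop]
    by_cases hlt : pos < chars.length
    · rw [if_pos hlt, ih chars bn (pos + (bn + 1)) _ (by omega),
          pyRange_pos_cons (pos : Int) (chars.length : Int) ((bn : Int) + 1) (by omega)
            (by exact_mod_cast hlt)]
      rw [List.map_cons, Int.toNat_natCast]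
      have hc : ((pos : Int) + ((bn : Int) + 1)) = (((pos + (bn + 1) : Nat)) : Int) := by push_cast; ring
      rw [hc, List.append_assoc, List.singleton_append]
    · rw [if_neg hlt,
          pyRange_nonpos_nil _ _ _ (by omega) (by exact_mod_cast by omega)]
      simp

-- ===== VERDICT (by name: the statement is the Claim_ definition above) =====
theorem getBlocksFromText_spec : Claim_equal_getBlocksFromText := by
  intro message blockSize _hdom hpre
  unfold Spec_getBlocksFromText getBlocksFromText getBlocksFromText_alt
  dsimp only
  rcases lt_or_gt_of_ne hpre.1 with hneg | hpos
  · rw [if_pos (le_of_lt hneg),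
        pyRange_zero_neg_step _ _ hneg (Int.natCast_nonneg _)]
    rfl
  · rw [if_neg (by omega)]
    rw [PySem.List.foldl_append_singleton_eq_map, List.nil_append]
    have hbn : ((blockSize.toNat - 1 : Nat) : Int) + 1 = blockSize := by omega
    have hbn' : (blockSize.toNat - 1) + 1 = blockSize.toNat := by omega
    rw [altLoop_eq (message.toList.length) message.toList (blockSize.toNat - 1) 0 [] (by omega),
        List.nil_append, Int.natCast_zero, hbn, hbn']
    apply List.map_congr_left
    intro bs hbs
    have hm := (PySem.List.mem_pyRange_iff_of_pos hpos bs).1 hbs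
    exact blockVal_eq message.toList blockSize bs hpos hm.1 hm.2.1 (by
      obtain ⟨_, _, q, hq⟩ := hm
      exact ⟨q, by omega⟩)
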